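-- pv_equiv track=rewrite | github.com/cutehammond772/problem-solving-archive | 백준/Platinum/17469. 트리의 색깔과 쿼리/트리의 색깔과 쿼리.py | solve
-- ===== SOURCE A (Python) =====
-- def find(roots, x):
-- 	if roots[x] != x:
-- 		routes = [x]
--
-- 		while routes[-1] != roots[routes[-1]]:
-- 			routes.append(roots[routes[-1]])
--
-- 		for route in routes:
-- 			roots[route] = routes[-1]
--
-- 	return roots[x]
--
-- def union(roots, colors, x, y):
-- 	x, y = find(roots, x), find(roots, y)
--
-- 	# Small to Large Trick
-- 	if len(colors[x]) >= len(colors[y]):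
-- 		colors[x] |= colors[y]
-- 		roots[y] = x
--
-- 	else:
-- 		colors[y] |= colors[x]
-- 		roots[x] = y
--
-- def solve(N, colors, parents, queries, cut):
-- 	roots = [x for x in range(N + 1)]
--
-- 	for node in range(2, N + 1):
-- 		if cut[node]:
-- 			continue
--
-- 		union(roots, colors, node, parents[node])
--
-- 	queries.reverse()
-- 	result = []
--
-- 	for a, node in queries:
-- 		if a == 1:
-- 			union(roots, colors, node, parents[node])
--
-- 		elif a == 2:
-- 			result.append(len(colors[find(roots, node)]))
--
-- 	return result[::-1]
-- ===== SOURCE B (Python) =====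
-- # B: one uniform event loop (initial edges and reversed queries merged into a single
-- # event list) with recursive path-compression find and swap-based union; A's `queries`
-- # is not reversed in place (equivalence is about the return value only).
-- def find(roots, x):
-- 	if roots[x] != x:
-- 		roots[x] = find(roots, roots[x])
-- 	return roots[x]
--
-- def union(roots, colors, x, y):
-- 	x, y = find(roots, x), find(roots, y)
--
-- 	if len(colors[x]) < len(colors[y]):
-- 		x, y = y, x
--
-- 	colors[x] |= colors[y]
-- 	roots[y] = x
--
-- def solve(N, colors, parents, queries, cut):
-- 	roots = list(range(N + 1))
--
-- 	events = [(1, node) for node in range(2, N + 1) if not cut[node]]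
-- 	events += [q for q in reversed(queries) if q[0] == 1 or q[0] == 2]
--
-- 	out = []
-- 	for a, node in events:
-- 		if a == 1:
-- 			union(roots, colors, node, parents[node])
-- 		else:
-- 			out.append(len(colors[find(roots, node)]))
--
-- 	out.reverse()
-- 	return out
-- ===== Notes on version B (the rewrite author's own statement) =====
-- stated objective: alternative
-- what changed: B merges the initial non-cut edges and the reversed queries into one event list replayed by a single uniform loop (instead of A's two separate loops), rewrites find as recursive path compression (no route list, no two-pass loop) and union with a single swap instead of two duplicated branches; A's queries list is not reversed in place.
-- outside the precondition, e.g. on solve(1, [set(), set()], [0, 0], [(2, -1)], [False, False]): A returns [0], B returns [0]; on solve(2, [set(), {7}, {8}], [0, 0, -1], [(2, 2)], [False, False, False]): A returns [1], B returns [1]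
import Mathlib
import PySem

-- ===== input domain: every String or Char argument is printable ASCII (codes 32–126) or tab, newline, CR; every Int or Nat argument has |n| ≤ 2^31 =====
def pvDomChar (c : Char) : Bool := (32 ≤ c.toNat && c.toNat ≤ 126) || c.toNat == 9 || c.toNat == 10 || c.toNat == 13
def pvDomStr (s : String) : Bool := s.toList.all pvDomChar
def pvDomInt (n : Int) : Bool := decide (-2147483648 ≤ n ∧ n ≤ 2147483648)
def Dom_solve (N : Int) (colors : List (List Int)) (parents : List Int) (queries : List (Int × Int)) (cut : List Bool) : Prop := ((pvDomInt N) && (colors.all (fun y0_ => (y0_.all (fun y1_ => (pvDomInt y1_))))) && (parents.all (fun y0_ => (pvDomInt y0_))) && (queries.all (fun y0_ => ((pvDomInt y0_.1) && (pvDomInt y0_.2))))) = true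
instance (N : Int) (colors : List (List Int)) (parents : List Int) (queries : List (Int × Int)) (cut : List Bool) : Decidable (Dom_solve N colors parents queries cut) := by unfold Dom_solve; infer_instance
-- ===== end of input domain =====

-- B merges the initial non-cut edges and the reversed queries into ONE event list
-- replayed by a single uniform loop, rewrites `find` as recursive path compression and
-- `union` with a swap (objective: alternative decomposition).  Equivalence is about the
-- RETURN value only: A reverses `queries` in place and both mutate `roots`/`colors`.

-- shared indexing helpers (Python xs[i] / xs[i] = v, exact via PySem; used by both ports)
def pvL (rs : List Int) (i : Int) : Int := PySem.List.pyGetD rs i 0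
def pvS (rs : List Int) (i v : Int) : List Int := PySem.List.pySetD rs i v
def pvC (cs : List (List Int)) (i : Int) : List Int := PySem.List.pyGetD cs i []

-- ===== PORT A =====
-- the `while routes[-1] != roots[routes[-1]]` loop (fuel = len(roots): ample, the walk
-- visits distinct indices)
def whileRoutesA (roots : List Int) : Nat → List Int → List Int
  | 0, routes => routes
  | f + 1, routes =>
      let last := PySem.List.pyGetD routes (-1) 0
      if pvL roots last ≠ last then
        whileRoutesA roots f (routes ++ [pvL roots last])
      else routes

def findA (fuel : Nat) (roots : List Int) (x : Int) : List Int × Int :=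
  if pvL roots x ≠ x then
    let routes := whileRoutesA roots fuel [x]
    let r := PySem.List.pyGetD routes (-1) 0
    let roots1 := routes.foldl (fun m c => pvS m c r) roots
    (roots1, pvL roots1 x)
  else (roots, pvL roots x)

def unionA (roots : List Int) (colors : List (List Int)) (x y : Int) :
    List Int × List (List Int) :=
  let p := findA roots.length roots x
  let q := findA p.1.length p.1 y
  if PySem.Set.len (pvC colors p.2) ≥ PySem.Set.len (pvC colors q.2) then
    (pvS q.1 q.2 p.2, PySem.List.pySetD colors p.2 (PySem.Set.union (pvC colors p.2) (pvC colors q.2)))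
  else
    (pvS q.1 p.2 q.2, PySem.List.pySetD colors q.2 (PySem.Set.union (pvC colors q.2) (pvC colors p.2)))

def solve (N : Int) (colors : List (List Int)) (parents : List Int) (queries : List (Int × Int)) (cut : List Bool) : List Int :=
  let roots := PySem.List.pyRange 0 (N + 1) 1
  let st1 := (PySem.List.pyRange 2 (N + 1) 1).foldl
    (fun (st : List Int × List (List Int)) node =>
      if PySem.List.pyGetD cut node false then st
      else unionA st.1 st.2 node (PySem.List.pyGetD parents node 0)) (roots, colors)
  let qs := queries.reverse
  let st2 := qs.foldl
    (fun (acc : (List Int × List (List Int)) × List Int) q =>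
      if q.1 = 1 then (unionA acc.1.1 acc.1.2 q.2 (PySem.List.pyGetD parents q.2 0), acc.2)
      else if q.1 = 2 then
        let p := findA acc.1.1.length acc.1.1 q.2
        ((p.1, acc.1.2), acc.2 ++ [PySem.Set.len (pvC acc.1.2 p.2)])
      else acc) ((st1.1, st1.2), ([] : List Int))
  (PySem.List.slice? st2.2 none none (-1)).getD []

-- ===== PORT B =====
-- recursive path compression (fuel = len(roots), ample as above)
def findB : Nat → List Int → Int → List Int × Int
  | 0, roots, x => (roots, pvL roots x)
  | f + 1, roots, x =>
      if pvL roots x ≠ x then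
        let p := findB f roots (pvL roots x)
        let r2 := pvS p.1 x p.2
        (r2, pvL r2 x)
      else (roots, pvL roots x)

def unionB (roots : List Int) (colors : List (List Int)) (x y : Int) :
    List Int × List (List Int) :=
  let p := findB roots.length roots x
  let q := findB p.1.length p.1 y
  let xy := if PySem.Set.len (pvC colors p.2) < PySem.Set.len (pvC colors q.2)
            then (q.2, p.2) else (p.2, q.2)
  (pvS q.1 xy.2 xy.1, PySem.List.pySetD colors xy.1 (PySem.Set.union (pvC colors xy.1) (pvC colors xy.2)))

def solve_alt (N : Int) (colors : List (List Int)) (parents : List Int) (queries : List (Int × Int)) (cut : List Bool) : List Int :=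
  let roots := PySem.List.pyRange 0 (N + 1) 1
  let events :=
    ((PySem.List.pyRange 2 (N + 1) 1).filter
        (fun node => !(PySem.List.pyGetD cut node false))).map (fun node => ((1 : Int), node))
    ++ queries.reverse.filter (fun q => q.1 == 1 || q.1 == 2)
  let fin := events.foldl
    (fun (acc : (List Int × List (List Int)) × List Int) e =>
      if e.1 = 1 then (unionB acc.1.1 acc.1.2 e.2 (PySem.List.pyGetD parents e.2 0), acc.2)
      else
        let p := findB acc.1.1.length acc.1.1 e.2
        ((p.1, acc.1.2), acc.2 ++ [PySem.Set.len (pvC acc.1.2 p.2)]))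
    ((roots, colors), ([] : List Int))
  fin.2.reverse

-- ===== PRECONDITION & SPEC =====
-- Pre_ is exactly the inputs the ports are claimed on: every index A dereferences is a
-- valid non-negative one (arrays sized at least N+1 where they are read, parent/query
-- labels in 0..N).  It excludes inputs where A raises IndexError, and also inputs on
-- which A still returns via Python's negative-index wraparound (negative labels), which
-- read the arrays through aliased positions.
def Pre_solve (N : Int) (colors : List (List Int)) (parents : List Int) (queries : List (Int × Int)) (cut : List Bool) : Prop :=
  (2 ≤ N → ((cut.length : Int) ≥ N + 1 ∧ (parents.length : Int) ≥ N + 1 ∧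
    (colors.length : Int) ≥ N + 1 ∧
    ∀ node ∈ PySem.List.pyRange 2 (N + 1) 1,
      0 ≤ PySem.List.pyGetD parents node 0 ∧ PySem.List.pyGetD parents node 0 ≤ N)) ∧
  (∀ q ∈ queries, q.1 = 1 ∨ q.1 = 2 →
    (0 ≤ N ∧ (colors.length : Int) ≥ N + 1 ∧ 0 ≤ q.2 ∧ q.2 ≤ N ∧
     (q.1 = 1 → (parents.length : Int) ≥ N + 1 ∧
       0 ≤ PySem.List.pyGetD parents q.2 0 ∧ PySem.List.pyGetD parents q.2 0 ≤ N)))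
instance (N : Int) (colors : List (List Int)) (parents : List Int) (queries : List (Int × Int)) (cut : List Bool) : Decidable (Pre_solve N colors parents queries cut) := by unfold Pre_solve; infer_instance

def pvWitness_solve : Int × List (List Int) × List Int × (List (Int × Int)) × List Bool :=
  (1, [[], [5]], [0, 0], [(2, 1), (1, 1)], [false, false])

def Spec_solve (N : Int) (colors : List (List Int)) (parents : List Int) (queries : List (Int × Int)) (cut : List Bool) (out : List Int) : Prop := out = solve_alt N colors parents queries cut
instance (N : Int) (colors : List (List Int)) (parents : List Int) (queries : List (Int × Int)) (cut : List Bool) (out : List Int) : Decidable (Spec_solve N colors parents queries cut out) := by unfold Spec_solve; infer_instance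

-- ===== CLAIM (what is proved, stated in full; the proofs are below) =====
def Claim_equal_solve : Prop := ∀ (N : Int) (colors : List (List Int)) (parents : List Int) (queries : List (Int × Int)) (cut : List Bool), Dom_solve N colors parents queries cut → Pre_solve N colors parents queries cut → Spec_solve N colors parents queries cut (solve N colors parents queries cut)

-- ===== LEMMAS AND PROOFS =====

-- proof-only notions: in-range indices, the parent-pointer chain from x to its root,
-- and the state invariant maintained by both ports

def pvInR (n : Nat) (x : Int) : Prop := 0 ≤ x ∧ x < (n : Int)

inductive PvChain (rs : List Int) : Int → List Int → Prop
  | root (x : Int) : pvL rs x = x → PvChain rs x [x]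
  | step (x : Int) (cs : List Int) : pvL rs x ≠ x → PvChain rs (pvL rs x) cs →
      PvChain rs x (x :: cs)

def PvInv (n : Nat) (rs : List Int) : Prop :=
  rs.length = n ∧ (∀ v ∈ rs, pvInR n v) ∧ ∀ x : Int, pvInR n x → ∃ cs, PvChain rs x cs

-- basic index lemmas
theorem pvL_natCast (rs : List Int) (j : Nat) (hj : j < rs.length) :
    pvL rs (j : Int) = rs[j] := by
  simp [pvL, List.getD_eq_getElem?_getD, List.getElem?_eq_getElem hj]

theorem length_pvS (m : List Int) (c v : Int) : (pvS m c v).length = m.length := by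
  simp [pvS]

theorem pvL_pvS (m : List Int) (c v z : Int) (hc0 : 0 ≤ c) (hc : c < (m.length : Int))
    (hz : 0 ≤ z) : pvL (pvS m c v) z = if z = c then v else pvL m z := by
  simp only [pvL, pvS, PySem.List.pySetD_of_nonneg _ _ hc0, PySem.List.pyGetD_of_nonneg _ _ hz]
  rw [List.getD_eq_getElem?_getD, List.getD_eq_getElem?_getD, List.getElem?_set]
  split_ifs with h1 h2 h3 h4 <;> simp_all <;> omega

theorem mem_pvS (m : List Int) (c v w : Int) (hc0 : 0 ≤ c) (hw : w ∈ pvS m c v) :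
    w ∈ m ∨ w = v := by
  rw [pvS, PySem.List.pySetD_of_nonneg _ _ hc0] at hw
  exact List.mem_or_eq_of_mem_set hw

theorem chain_cons (rs : List Int) (x : Int) (cs : List Int) (h : PvChain rs x cs) :
    ∃ t, cs = x :: t := by
  cases h with
  | root _ _ => exact ⟨[], rfl⟩
  | step _ cs _ _ => exact ⟨cs, rfl⟩

theorem chain_unique (rs : List Int) (x : Int) (cs cs' : List Int) (h : PvChain rs x cs)
    (h' : PvChain rs x cs') : cs = cs' := by
  induction h generalizing cs' with
  | root y hy => cases h' with
    | root => rfl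
    | step _ _ hne _ => exact absurd hy hne
  | step y t hne ht ih => cases h' with
    | root _ hy => exact absurd hy hne
    | step _ t' _ ht' => rw [ih t' ht']

theorem chain_sub (rs : List Int) (x : Int) (cs : List Int) (h : PvChain rs x cs) :
    ∀ c ∈ cs, ∃ t, PvChain rs c t ∧ t.length ≤ cs.length := by
  induction h with
  | root y hy =>
    intro c hc; rw [List.mem_singleton] at hc; subst hc
    exact ⟨[c], PvChain.root c hy, le_rfl⟩
  | step y t hne ht ih =>
    intro c hc
    rcases List.mem_cons.1 hc with rfl | hc
    · exact ⟨c :: t, PvChain.step c t hne ht, le_rfl⟩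
    · obtain ⟨t', h1, h2⟩ := ih c hc
      exact ⟨t', h1, by simpa using Nat.le_succ_of_le h2⟩

theorem chain_nodup (rs : List Int) (x : Int) (cs : List Int) (h : PvChain rs x cs) :
    cs.Nodup := by
  induction h with
  | root y hy => simp
  | step y t hne ht ih =>
    refine List.nodup_cons.2 ⟨?_, ih⟩
    intro hmem
    obtain ⟨t', h1, h2⟩ := chain_sub rs (pvL rs y) t ht y hmem
    have := chain_unique rs y t' (y :: t) h1 (PvChain.step y t hne ht)
    subst this
    simp at h2

theorem chain_getLast_root (rs : List Int) (x : Int) (cs : List Int) (h : PvChain rs x cs)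
    (hne : cs ≠ []) : pvL rs (cs.getLast hne) = cs.getLast hne := by
  induction h with
  | root y hy => simpa using hy
  | step y t hne' ht ih =>
    have htne : t ≠ [] := by rcases chain_cons _ _ _ ht with ⟨t', rfl⟩; simp
    rw [List.getLast_cons htne]
    exact ih htne

theorem chain_dropLast_nonroot (rs : List Int) (x : Int) (cs : List Int)
    (h : PvChain rs x cs) : ∀ c ∈ cs.dropLast, pvL rs c ≠ c := by
  induction h with
  | root y hy => simp
  | step y t hne ht ih =>
    have htne : t ≠ [] := by rcases chain_cons _ _ _ ht with ⟨t', rfl⟩; simp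
    intro c hc
    rw [List.dropLast_cons_of_ne_nil htne] at hc
    rcases List.mem_cons.1 hc with rfl | hc
    · exact hne
    · exact ih c hc

theorem chain_mem_inR (rs : List Int) (x : Int) (cs : List Int) (h : PvChain rs x cs)
    (hx : pvInR rs.length x) (hval : ∀ v ∈ rs, pvInR rs.length v) :
    ∀ c ∈ cs, pvInR rs.length c := by
  induction h with
  | root y hy => intro c hc; rw [List.mem_singleton] at hc; subst hc; exact hx
  | step y t hne ht ih =>
    intro c hc
    have hmem : pvL rs y ∈ rs := by
      apply PySem.List.pyGetD_mem
      simp [PySem.Raise.InRange]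
      rcases hx with ⟨h1, h2⟩; omega
    rcases List.mem_cons.1 hc with rfl | hc
    · exact hx
    · exact ih (hval _ hmem) c hc

theorem chain_length_le (n : Nat) (cs : List Int) (hn : cs.Nodup)
    (hr : ∀ c ∈ cs, pvInR n c) : cs.length ≤ n := by
  classical
  have hinj : ∀ a ∈ cs, ∀ b ∈ cs, a.toNat = b.toNat → a = b := by
    intro a ha b hb hab
    have := (hr a ha).1; have := (hr b hb).1; omega
  have hnd : (cs.map Int.toNat).Nodup := List.Nodup.map_on hinj hn
  have hsub : (cs.map Int.toNat).toFinset ⊆ Finset.range n := by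
    intro a ha
    simp only [List.mem_toFinset, List.mem_map] at ha
    obtain ⟨b, hb, rfl⟩ := ha
    have := hr b hb
    simp only [Finset.mem_range]
    rcases this with ⟨h1, h2⟩; omega
  have := Finset.card_le_card hsub
  rw [List.toFinset_card_of_nodup hnd, Finset.card_range, List.length_map] at this
  exact this

theorem length_pvWr (rs : List Int) (l : List Int) (r : Int) :
    (l.foldr (fun c m => pvS m c r) rs).length = rs.length := by
  induction l with
  | nil => rfl
  | cons c l ih => simp [length_pvS, ih]

theorem pvL_pvWr (rs : List Int) (l : List Int) (r z : Int)
    (hl : ∀ c ∈ l, pvInR rs.length c) (hz : 0 ≤ z) :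
    pvL (l.foldr (fun c m => pvS m c r) rs) z = if z ∈ l then r else pvL rs z := by
  induction l with
  | nil => simp
  | cons c l ih =>
    have hc := hl c (List.mem_cons_self)
    have hlen := length_pvWr rs l r
    simp only [List.foldr_cons]
    rw [pvL_pvS _ _ _ _ hc.1 (by rw [hlen]; exact hc.2) hz,
        ih (fun c hc => hl c (List.mem_cons_of_mem _ hc))]
    by_cases h1 : z = c <;> by_cases h2 : z ∈ l <;> simp [h1, h2]

theorem mem_pvWr (rs : List Int) (l : List Int) (r w : Int) (hl : ∀ c ∈ l, 0 ≤ c)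
    (hw : w ∈ l.foldr (fun c m => pvS m c r) rs) : w ∈ rs ∨ w = r := by
  induction l with
  | nil => exact Or.inl hw
  | cons c l ih =>
    simp only [List.foldr_cons] at hw
    rcases mem_pvS _ _ _ _ (hl c List.mem_cons_self) hw with h | h
    · exact ih (fun c hc => hl c (List.mem_cons_of_mem _ hc)) h
    · exact Or.inr h

theorem length_pvWrl (rs : List Int) (l : List Int) (r : Int) :
    (l.foldl (fun m c => pvS m c r) rs).length = rs.length := by
  induction l generalizing rs with
  | nil => rfl
  | cons c l ih => simp [ih, length_pvS]

theorem pvL_pvWrl (rs : List Int) (l : List Int) (r z : Int)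
    (hl : ∀ c ∈ l, pvInR rs.length c) (hz : 0 ≤ z) :
    pvL (l.foldl (fun m c => pvS m c r) rs) z = if z ∈ l then r else pvL rs z := by
  induction l generalizing rs with
  | nil => simp
  | cons c l ih =>
    have hc := hl c (List.mem_cons_self)
    simp only [List.foldl_cons]
    rw [ih (pvS rs c r) (by
      intro a ha
      have := hl a (List.mem_cons_of_mem _ ha)
      rwa [length_pvS]),
      pvL_pvS _ _ _ _ hc.1 hc.2 hz]
    by_cases h1 : z = c <;> by_cases h2 : z ∈ l <;> simp [h1, h2]

theorem whileRoutesA_spec (rs : List Int) (y : Int) (cs : List Int) (h : PvChain rs y cs) :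
    ∀ (f : Nat) (pre : List Int), cs.length ≤ f + 1 →
      whileRoutesA rs f (pre ++ [y]) = pre ++ cs := by
  induction h with
  | root z hz =>
    intro f pre _
    cases f with
    | zero => rfl
    | succ f =>
      rw [whileRoutesA]
      simp only [PySem.List.pyGetD_neg_one_append_singleton]
      rw [if_neg (by simpa using hz)]
  | step z t hne ht ih =>
    intro f pre hlen
    obtain ⟨t', rfl⟩ := chain_cons _ _ _ ht
    cases f with
    | zero => simp at hlen
    | succ f =>
      rw [whileRoutesA]
      simp only [PySem.List.pyGetD_neg_one_append_singleton]
      rw [if_pos hne]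
      have := ih f (pre ++ [z]) (by simp at hlen ⊢; omega)
      simpa using this

theorem findB_spec (rs : List Int) (x : Int) (cs : List Int) (h : PvChain rs x cs)
    (hx : pvInR rs.length x) (hval : ∀ v ∈ rs, pvInR rs.length v) :
    ∀ f : Nat, cs.length ≤ f + 1 →
      ∃ r, cs.getLast? = some r ∧
        findB f rs x = (cs.dropLast.foldr (fun c m => pvS m c r) rs, r) := by
  induction h with
  | root z hz =>
    intro f _
    refine ⟨z, rfl, ?_⟩
    cases f with
    | zero => simpa [findB, pvL] using hz
    | succ f => simp [findB, hz]
  | step z t hne ht ih =>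
    intro f hlen
    obtain ⟨w, t', rfl⟩ : ∃ w t', t = w :: t' := by
      rcases chain_cons _ _ _ ht with ⟨t', rfl⟩; exact ⟨_, _, rfl⟩
    cases f with
    | zero => simp at hlen
    | succ f =>
      have hzin : pvInR rs.length (pvL rs z) := by
        refine hval _ ?_
        apply PySem.List.pyGetD_mem
        simp [PySem.Raise.InRange]; rcases hx with ⟨h1, h2⟩; omega
      obtain ⟨r, hr, hp⟩ := ih hzin f (by simp at hlen ⊢; omega)
      refine ⟨r, by rw [List.getLast?_cons_cons]; exact hr, ?_⟩
      rw [findB, if_pos hne, hp]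
      have hlen2 : ((w :: t').dropLast.foldr (fun c m => pvS m c r) rs).length = rs.length :=
        length_pvWr _ _ _
      have : pvL (pvS ((w :: t').dropLast.foldr (fun c m => pvS m c r) rs) z r) z = r := by
        rw [pvL_pvS _ _ _ _ hx.1 (by rw [hlen2]; exact hx.2) hx.1]
        simp
      simp only [List.dropLast_cons_of_ne_nil (by simp : (w :: t') ≠ []), List.foldr_cons]
      exact Prod.ext rfl this

theorem findA_spec (rs : List Int) (x : Int) (cs : List Int) (h : PvChain rs x cs)
    (hx : pvInR rs.length x) (hval : ∀ v ∈ rs, pvInR rs.length v)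
    (f : Nat) (hf : cs.length ≤ f + 1) (r : Int) (hr : cs.getLast? = some r) :
    findA f rs x = (cs.dropLast.foldr (fun c m => pvS m c r) rs, r) := by
  have hne : cs ≠ [] := by rcases chain_cons _ _ _ h with ⟨t, rfl⟩; simp
  have hlast : cs.getLast hne = r := by
    rw [List.getLast?_eq_some_getLast hne] at hr; exact Option.some.inj hr
  by_cases hroot : pvL rs x = x
  · have hcs : cs = [x] := chain_unique _ _ _ _ h (PvChain.root x hroot)
    subst hcs
    simp only [List.getLast?_singleton, Option.some.injEq] at hr
    subst hr
    rw [findA, if_neg (by simp [hroot])]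
    simp [hroot]
  · rw [findA, if_pos hroot]
    have hroutes : whileRoutesA rs f [x] = cs := by
      have := whileRoutesA_spec rs x cs h f [] hf
      simpa using this
    simp only [hroutes]
    have hrneg : PySem.List.pyGetD cs (-1) 0 = r := by
      rw [PySem.List.pyGetD_neg_one cs 0 hne, hlast]
    rw [hrneg]
    have hmem : ∀ c ∈ cs, pvInR rs.length c := chain_mem_inR _ _ _ h hx hval
    have hmemD : ∀ c ∈ cs.dropLast, pvInR rs.length c := by
      intro c hc; exact hmem c (List.dropLast_sublist cs |>.mem hc)
    have hxcs : x ∈ cs := by rcases chain_cons _ _ _ h with ⟨t, rfl⟩; simp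
    have hrr : pvL rs r = r := by rw [← hlast]; exact chain_getLast_root _ _ _ h hne
    have hndp : cs.Nodup := chain_nodup _ _ _ h
    have hsplit : cs.dropLast ++ [r] = cs := by rw [← hlast]; exact List.dropLast_append_getLast hne
    have hrnotin : r ∉ cs.dropLast := by
      intro hin
      have := hndp
      rw [← hsplit] at this
      rcases List.nodup_append.1 this with ⟨-, -, hdisj⟩
      exact hdisj r hin r (by simp) rfl
    refine Prod.ext ?_ ?_
    · apply List.ext_getElem
      · rw [length_pvWrl, length_pvWr]
      · intro j hj1 hj2
        rw [length_pvWrl] at hj1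
        have hjL : pvL (cs.foldl (fun m c => pvS m c r) rs) (j : Int) =
            (cs.foldl (fun m c => pvS m c r) rs)[j] := by
          apply pvL_natCast
        have hjR : pvL (cs.dropLast.foldr (fun c m => pvS m c r) rs) (j : Int) =
            (cs.dropLast.foldr (fun c m => pvS m c r) rs)[j] := by
          apply pvL_natCast
        rw [← hjL, ← hjR, pvL_pvWrl rs cs r _ hmem (by positivity),
            pvL_pvWr rs cs.dropLast r _ hmemD (by positivity)]
        by_cases hd : (j : Int) ∈ cs.dropLast
        · rw [if_pos (by rw [← hsplit]; exact List.mem_append_left _ hd), if_pos hd]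
        · rw [if_neg hd]
          by_cases hcsm : (j : Int) ∈ cs
          · rw [if_pos hcsm]
            have hjr : (j : Int) = r := by
              rw [← hsplit] at hcsm
              rcases List.mem_append.1 hcsm with h1 | h1
              · exact absurd h1 hd
              · simpa using h1
            rw [hjr, hrr]
          · rw [if_neg hcsm]
    · rw [pvL_pvWrl rs cs r x hmem hx.1, if_pos hxcs]

theorem reach_preserved (rs rs' : List Int) (ρ : Int) (hρ : pvL rs' ρ = ρ)
    (hst : ∀ z, pvInR rs.length z → pvL rs' z = pvL rs z ∨ pvL rs' z = ρ)
    (hval : ∀ v ∈ rs, pvInR rs.length v) :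
    ∀ (x : Int) (cs : List Int), PvChain rs x cs → pvInR rs.length x →
      ∃ cs', PvChain rs' x cs' := by
  intro x cs h
  induction h with
  | root z hz =>
    intro hzin
    rcases hst z hzin with h1 | h1
    · exact ⟨[z], PvChain.root z (by rw [h1, hz])⟩
    · by_cases hzρ : ρ = z
      · exact ⟨[z], PvChain.root z (by rw [h1, hzρ])⟩
      · exact ⟨[z, ρ], PvChain.step z [ρ] (by rw [h1]; exact fun hc => hzρ hc)
          (by rw [h1]; exact PvChain.root ρ hρ)⟩
  | step z t hne ht ih =>
    intro hzin
    have hnext : pvInR rs.length (pvL rs z) := by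
      refine hval _ ?_
      apply PySem.List.pyGetD_mem
      simp [PySem.Raise.InRange]; rcases hzin with ⟨h1, h2⟩; omega
    rcases hst z hzin with h1 | h1
    · obtain ⟨cs', hcs'⟩ := ih hnext
      by_cases hzz : pvL rs' z = z
      · exact ⟨[z], PvChain.root z hzz⟩
      · exact ⟨z :: cs', PvChain.step z cs' hzz (by rw [h1]; exact hcs')⟩
    · by_cases hzρ : ρ = z
      · exact ⟨[z], PvChain.root z (by rw [h1, hzρ])⟩
      · exact ⟨[z, ρ], PvChain.step z [ρ] (by rw [h1]; exact fun hc => hzρ hc)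
          (by rw [h1]; exact PvChain.root ρ hρ)⟩

theorem find_spec (n : Nat) (rs : List Int) (x : Int) (hinv : PvInv n rs)
    (hx : pvInR n x) : ∃ F r,
      findA rs.length rs x = (F, r) ∧ findB rs.length rs x = (F, r) ∧ PvInv n F ∧
      pvInR n r ∧ pvL F r = r ∧
      (∀ z, pvInR n z → pvL rs z = z → pvL F z = z) := by
  obtain ⟨hlen, hval, hch⟩ := hinv
  subst hlen
  obtain ⟨cs, hcs⟩ := hch x hx
  have hmem : ∀ c ∈ cs, pvInR rs.length c := chain_mem_inR _ _ _ hcs hx hval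
  have hndp : cs.Nodup := chain_nodup _ _ _ hcs
  have hcslen : cs.length ≤ rs.length := chain_length_le _ _ hndp hmem
  have hne : cs ≠ [] := by rcases chain_cons _ _ _ hcs with ⟨t, rfl⟩; simp
  obtain ⟨r, hr, hB⟩ := findB_spec rs x cs hcs hx hval rs.length (by omega)
  have hA := findA_spec rs x cs hcs hx hval rs.length (by omega) r hr
  set F := cs.dropLast.foldr (fun c m => pvS m c r) rs with hF
  have hlast : cs.getLast hne = r := by
    rw [List.getLast?_eq_some_getLast hne] at hr; exact Option.some.inj hr
  have hsplit : cs.dropLast ++ [r] = cs := by rw [← hlast]; exact List.dropLast_append_getLast hne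
  have hrin : pvInR rs.length r := hmem r (by rw [← hsplit]; simp)
  have hrnotin : r ∉ cs.dropLast := by
    intro hin
    have := hndp; rw [← hsplit] at this
    rcases List.nodup_append.1 this with ⟨-, -, hdisj⟩
    exact hdisj r hin r (by simp) rfl
  have hmemD : ∀ c ∈ cs.dropLast, pvInR rs.length c := by
    intro c hc; exact hmem c (List.dropLast_sublist cs |>.mem hc)
  have hrroot : pvL rs r = r := by rw [← hlast]; exact chain_getLast_root _ _ _ hcs hne
  have hLF : ∀ z : Int, 0 ≤ z → pvL F z = if z ∈ cs.dropLast then r else pvL rs z :=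
    fun z hz => pvL_pvWr rs cs.dropLast r z hmemD hz
  have hFr : pvL F r = r := by rw [hLF r hrin.1, if_neg hrnotin]; exact hrroot
  refine ⟨F, r, hA, hB, ⟨length_pvWr _ _ _, ?_, ?_⟩, hrin, hFr, ?_⟩
  · intro v hv
    rcases mem_pvWr rs cs.dropLast r v (fun c hc => (hmemD c hc).1) hv with h1 | h1
    · exact hval v h1
    · exact h1 ▸ hrin
  · intro z hz
    obtain ⟨t, ht⟩ := hch z hz
    refine reach_preserved rs F r hFr ?_ hval z t ht hz
    intro w hw
    rw [hLF w hw.1]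
    by_cases hwd : w ∈ cs.dropLast
    · exact Or.inr (by rw [if_pos hwd])
    · exact Or.inl (by rw [if_neg hwd])
  · intro z hz hroot
    rw [hLF z hz.1]
    rw [if_neg (fun hin => chain_dropLast_nonroot _ _ _ hcs z hin hroot)]
    exact hroot

theorem inv_pvS_root (n : Nat) (rs : List Int) (a b : Int) (hinv : PvInv n rs)
    (ha : pvInR n a) (hb : pvInR n b) (hroot : pvL rs a = a) :
    PvInv n (pvS rs b a) := by
  obtain ⟨hlen, hval, hch⟩ := hinv
  subst hlen
  have hb' : b < (rs.length : Int) := hb.2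
  have hLS : ∀ z : Int, 0 ≤ z → pvL (pvS rs b a) z = if z = b then a else pvL rs z :=
    fun z hz => pvL_pvS rs b a z hb.1 hb' hz
  have hρ : pvL (pvS rs b a) a = a := by
    rw [hLS a ha.1]
    by_cases hab : a = b
    · rw [if_pos hab]
    · rw [if_neg hab]; exact hroot
  refine ⟨by simp [length_pvS], ?_, ?_⟩
  · intro v hv
    rcases mem_pvS rs b a v hb.1 hv with h1 | h1
    · exact hval v h1
    · exact h1 ▸ ha
  · intro z hz
    obtain ⟨t, ht⟩ := hch z hz
    refine reach_preserved rs (pvS rs b a) a hρ ?_ hval z t ht hz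
    intro w hw
    rw [hLS w hw.1]
    by_cases hwb : w = b
    · exact Or.inr (by rw [if_pos hwb])
    · exact Or.inl (by rw [if_neg hwb])

theorem union_spec (n : Nat) (rs : List Int) (colors : List (List Int)) (x y : Int)
    (hinv : PvInv n rs) (hx : pvInR n x) (hy : pvInR n y) :
    unionA rs colors x y = unionB rs colors x y ∧ PvInv n (unionA rs colors x y).1 := by
  obtain ⟨F1, r1, hA1, hB1, hinv1, hr1in, hr1root, hpres1⟩ := find_spec n rs x hinv hx
  obtain ⟨F2, r2, hA2, hB2, hinv2, hr2in, hr2root, hpres2⟩ := find_spec n F1 y hinv1 hy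
  have hr1rootF2 : pvL F2 r1 = r1 := hpres2 r1 hr1in hr1root
  unfold unionA unionB
  rw [hA1, hB1]
  simp only
  rw [hA2, hB2]
  simp only
  by_cases hc : PySem.Set.len (pvC colors r1) ≥ PySem.Set.len (pvC colors r2)
  · rw [if_pos hc, if_neg (by omega)]
    exact ⟨rfl, inv_pvS_root n F2 r1 r2 hinv2 hr1in hr2in hr1rootF2⟩
  · rw [if_neg hc, if_pos (by omega)]
    exact ⟨rfl, inv_pvS_root n F2 r2 r1 hinv2 hr2in hr1in hr2root⟩

theorem foldl_inv_congr {α σ : Type} (P : σ → Prop) (f g : σ → α → σ) :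
    ∀ (l : List α) (s : σ), P s → (∀ s a, a ∈ l → P s → f s a = g s a ∧ P (f s a)) →
      l.foldl f s = l.foldl g s ∧ P (l.foldl f s) := by
  intro l
  induction l with
  | nil => intro s hs _; exact ⟨rfl, hs⟩
  | cons a l ih =>
    intro s hs hstep
    obtain ⟨he, hp⟩ := hstep s a List.mem_cons_self hs
    simp only [List.foldl_cons]
    rw [← he]
    exact ih (f s a) hp (fun s b hb hP => hstep s b (List.mem_cons_of_mem _ hb) hP)

-- a fold whose step skips exactly the elements a filter drops equals the fold of the
-- kept step over the filtered list (pure list reshaping, no invariant)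
theorem foldl_filter_congr {α σ : Type} (p : α → Bool) (f g : σ → α → σ)
    (h1 : ∀ s a, p a = false → f s a = s) (h2 : ∀ s a, p a = true → f s a = g s a) :
    ∀ (l : List α) (s : σ), l.foldl f s = (l.filter p).foldl g s := by
  intro l
  induction l with
  | nil => intro s; rfl
  | cons a l ih =>
    intro s
    cases hp : p a with
    | false => simp only [List.foldl_cons, List.filter_cons, hp, h1 s a hp]; exact ih s
    | true =>
      simp only [List.foldl_cons, List.filter_cons, hp, h2 s a hp]
      exact ih (g s a)

-- folding the (1, node)-tagged event prefix only evolves the union-find state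
theorem foldl_events_init (parents : List Int) : ∀ (l : List Int)
    (s : List Int × List (List Int)) (out : List Int),
    (l.map (fun node => ((1 : Int), node))).foldl
      (fun (acc : (List Int × List (List Int)) × List Int) e =>
        if e.1 = 1 then (unionB acc.1.1 acc.1.2 e.2 (PySem.List.pyGetD parents e.2 0), acc.2)
        else
          (((findB acc.1.1.length acc.1.1 e.2).1, acc.1.2),
            acc.2 ++ [PySem.Set.len (pvC acc.1.2 (findB acc.1.1.length acc.1.1 e.2).2)]))
      (s, out)
    = (l.foldl (fun st node => unionB st.1 st.2 node (PySem.List.pyGetD parents node 0)) s, out) := by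
  intro l
  induction l with
  | nil => intro s out; rfl
  | cons a l ih => intro s out; simp only [List.map_cons, List.foldl_cons]; exact ih _ _

theorem pvInv_init (N : Int) :
    PvInv (N + 1).toNat (PySem.List.pyRange 0 (N + 1) 1) := by
  have hlen : (PySem.List.pyRange 0 (N + 1) 1).length = (N + 1).toNat := by
    rw [PySem.List.length_pyRange_one]; simp
  refine ⟨hlen, ?_, ?_⟩
  · intro v hv
    rw [PySem.List.mem_pyRange_one] at hv
    exact ⟨hv.1, by omega⟩
  · intro z hz
    refine ⟨[z], PvChain.root z ?_⟩
    rcases hz with ⟨hz0, hzlt⟩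
    have hzlt' : z < N + 1 := by omega
    have hzn : z.toNat < (PySem.List.pyRange 0 (N + 1) 1).length := by rw [hlen]; omega
    rw [pvL, PySem.List.pyGetD_of_nonneg _ _ hz0, List.getD_eq_getElem _ _ hzn,
      PySem.List.getElem_pyRange_one]
    omega

theorem solve_spec : Claim_equal_solve := by
  intro N colors parents queries cut _ hpre
  obtain ⟨hph1, hq⟩ := hpre
  set n := (N + 1).toNat with hn
  have hinRn : ∀ z : Int, 0 ≤ z → z ≤ N → pvInR n z := by
    intro z h1 h2; exact ⟨h1, by omega⟩
  -- step 1: replace A's primitives by B's under the invariant (same fold shapes)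
  have hstep1 : ∀ (st : List Int × List (List Int)) (node : Int),
      node ∈ PySem.List.pyRange 2 (N + 1) 1 → PvInv n st.1 →
      (if PySem.List.pyGetD cut node false then st
        else unionA st.1 st.2 node (PySem.List.pyGetD parents node 0)) =
      (if PySem.List.pyGetD cut node false then st
        else unionB st.1 st.2 node (PySem.List.pyGetD parents node 0)) ∧
      PvInv n (if PySem.List.pyGetD cut node false then st
        else unionA st.1 st.2 node (PySem.List.pyGetD parents node 0)).1 := by
    intro st node hnode hP
    have hnode' := PySem.List.mem_pyRange_one.1 hnode
    obtain ⟨-, -, -, hpar⟩ := hph1 (by omega)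
    obtain ⟨hpv0, hpvN⟩ := hpar node hnode
    cases hcut : PySem.List.pyGetD cut node false with
    | true => exact ⟨rfl, hP⟩
    | false =>
      simp only [if_neg Bool.false_ne_true]
      exact union_spec n st.1 st.2 node (PySem.List.pyGetD parents node 0) hP
        (hinRn node (by omega) (by omega)) (hinRn _ hpv0 hpvN)
  obtain ⟨h1eq, h1inv⟩ := foldl_inv_congr (σ := List Int × List (List Int))
    (fun st => PvInv n st.1)
    (fun st node => if PySem.List.pyGetD cut node false then st
      else unionA st.1 st.2 node (PySem.List.pyGetD parents node 0))
    (fun st node => if PySem.List.pyGetD cut node false then st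
      else unionB st.1 st.2 node (PySem.List.pyGetD parents node 0))
    (PySem.List.pyRange 2 (N + 1) 1)
    (PySem.List.pyRange 0 (N + 1) 1, colors) (pvInv_init N) hstep1
  have hstep2 : ∀ (acc : (List Int × List (List Int)) × List Int) (q : Int × Int),
      q ∈ queries.reverse → PvInv n acc.1.1 →
      (if q.1 = 1 then
        (unionA acc.1.1 acc.1.2 q.2 (PySem.List.pyGetD parents q.2 0), acc.2)
      else if q.1 = 2 then
        (((findA acc.1.1.length acc.1.1 q.2).1, acc.1.2),
          acc.2 ++ [PySem.Set.len (pvC acc.1.2 (findA acc.1.1.length acc.1.1 q.2).2)])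
      else acc) =
      (if q.1 = 1 then
        (unionB acc.1.1 acc.1.2 q.2 (PySem.List.pyGetD parents q.2 0), acc.2)
      else if q.1 = 2 then
        (((findB acc.1.1.length acc.1.1 q.2).1, acc.1.2),
          acc.2 ++ [PySem.Set.len (pvC acc.1.2 (findB acc.1.1.length acc.1.1 q.2).2)])
      else acc) ∧
      PvInv n ((if q.1 = 1 then
        (unionA acc.1.1 acc.1.2 q.2 (PySem.List.pyGetD parents q.2 0), acc.2)
      else if q.1 = 2 then
        (((findA acc.1.1.length acc.1.1 q.2).1, acc.1.2),
          acc.2 ++ [PySem.Set.len (pvC acc.1.2 (findA acc.1.1.length acc.1.1 q.2).2)])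
      else acc)).1.1 := by
    intro acc q hqin hP
    have hq2 := hq q (List.mem_reverse.1 hqin)
    by_cases hq1 : q.1 = 1
    · obtain ⟨-, -, hn0, hnN, hp1⟩ := hq2 (Or.inl hq1)
      obtain ⟨-, hpv0, hpvN⟩ := hp1 hq1
      simp only [if_pos hq1]
      obtain ⟨he, hi⟩ := union_spec n acc.1.1 acc.1.2 q.2 (PySem.List.pyGetD parents q.2 0)
        hP (hinRn _ hn0 hnN) (hinRn _ hpv0 hpvN)
      exact ⟨by rw [he], hi⟩
    · simp only [if_neg hq1]
      by_cases hq2' : q.1 = 2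
      · obtain ⟨-, -, hn0, hnN, -⟩ := hq2 (Or.inr hq2')
        simp only [if_pos hq2']
        obtain ⟨F, r, hA, hB, hinvF, -, -, -⟩ := find_spec n acc.1.1 q.2 hP
          (hinRn _ hn0 hnN)
        rw [hA, hB]
        exact ⟨by trivial, hinvF⟩
      · simp only [if_neg hq2']
        exact ⟨by trivial, hP⟩
  obtain ⟨h2eq, -⟩ := foldl_inv_congr (σ := (List Int × List (List Int)) × List Int)
    (fun acc => PvInv n acc.1.1)
    (fun acc q => if q.1 = 1 then
        (unionA acc.1.1 acc.1.2 q.2 (PySem.List.pyGetD parents q.2 0), acc.2)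
      else if q.1 = 2 then
        (((findA acc.1.1.length acc.1.1 q.2).1, acc.1.2),
          acc.2 ++ [PySem.Set.len (pvC acc.1.2 (findA acc.1.1.length acc.1.1 q.2).2)])
      else acc)
    (fun acc q => if q.1 = 1 then
        (unionB acc.1.1 acc.1.2 q.2 (PySem.List.pyGetD parents q.2 0), acc.2)
      else if q.1 = 2 then
        (((findB acc.1.1.length acc.1.1 q.2).1, acc.1.2),
          acc.2 ++ [PySem.Set.len (pvC acc.1.2 (findB acc.1.1.length acc.1.1 q.2).2)])
      else acc)
    queries.reverse
    (((PySem.List.pyRange 2 (N + 1) 1).foldl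
      (fun st node => if PySem.List.pyGetD cut node false then st
        else unionB st.1 st.2 node (PySem.List.pyGetD parents node 0))
      (PySem.List.pyRange 0 (N + 1) 1, colors)), []) (by rw [← h1eq]; exact h1inv) hstep2
  -- step 2: pure list reshaping of the B-primitive folds into B's single event fold
  have hfilter1 : (PySem.List.pyRange 2 (N + 1) 1).foldl
      (fun (st : List Int × List (List Int)) node =>
        if PySem.List.pyGetD cut node false then st
        else unionB st.1 st.2 node (PySem.List.pyGetD parents node 0))
      (PySem.List.pyRange 0 (N + 1) 1, colors)
      = ((PySem.List.pyRange 2 (N + 1) 1).filter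
          (fun node => !(PySem.List.pyGetD cut node false))).foldl
        (fun st node => unionB st.1 st.2 node (PySem.List.pyGetD parents node 0))
        (PySem.List.pyRange 0 (N + 1) 1, colors) := by
    apply foldl_filter_congr
    · intro s a hp
      rw [if_pos (by simpa using hp)]
    · intro s a hp
      rw [if_neg (by simpa using hp)]
  have hfilter2 : ∀ (s : (List Int × List (List Int)) × List Int),
      queries.reverse.foldl
        (fun (acc : (List Int × List (List Int)) × List Int) (q : Int × Int) =>
          if q.1 = 1 then
            (unionB acc.1.1 acc.1.2 q.2 (PySem.List.pyGetD parents q.2 0), acc.2)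
          else if q.1 = 2 then
            (((findB acc.1.1.length acc.1.1 q.2).1, acc.1.2),
              acc.2 ++ [PySem.Set.len (pvC acc.1.2 (findB acc.1.1.length acc.1.1 q.2).2)])
          else acc) s
      = (queries.reverse.filter (fun q => q.1 == 1 || q.1 == 2)).foldl
        (fun (acc : (List Int × List (List Int)) × List Int) e =>
          if e.1 = 1 then (unionB acc.1.1 acc.1.2 e.2 (PySem.List.pyGetD parents e.2 0), acc.2)
          else
            let p := findB acc.1.1.length acc.1.1 e.2
            ((p.1, acc.1.2), acc.2 ++ [PySem.Set.len (pvC acc.1.2 p.2)])) s := by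
    intro s
    apply foldl_filter_congr
    · intro s q hp
      simp only [Bool.or_eq_false_iff, beq_eq_false_iff_ne, ne_eq] at hp
      rw [if_neg hp.1, if_neg hp.2]
    · intro s q hp
      simp only [Bool.or_eq_true, beq_iff_eq] at hp
      rcases hp with h1 | h2
      · rw [if_pos h1, if_pos h1]
      · by_cases h1 : q.1 = 1
        · rw [if_pos h1, if_pos h1]
        · rw [if_neg h1, if_neg h1, if_pos h2]
  show solve N colors parents queries cut = solve_alt N colors parents queries cut
  simp only [solve, solve_alt]
  rw [h1eq, h2eq, hfilter1, hfilter2, PySem.List.slice?_none_none_neg_one]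
  rw [List.foldl_append, foldl_events_init]
  rfl
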